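-- pv_equiv track=rewrite | github.com/takedary/codility | l10_4_Peaks.py | find_peaks
-- ===== SOURCE A (Python) =====
-- def find_peaks(A, N):
--   cum_p = 0
--   cum_ps = [cum_p]
--   max_gap, cur_gap = 0, 0
--   head_gap = 0
--   for i in range(1, N-1):
--     if cum_p > 0:
--       cur_gap += 1
--     if A[i] > max(A[i-1], A[i+1]):
--       cum_p += 1
--       max_gap = max(cur_gap, max_gap)
--       cur_gap = 0
--       if cum_p == 1:
--         head_gap = i + 1
--     cum_ps.append(cum_p)
--   cum_ps.append(cum_ps[-1])
--   min_block_size = max(head_gap, (max_gap+2)//2, cur_gap+2)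
--   return cum_ps, min_block_size
-- ===== SOURCE B (Python) =====
-- def find_peaks(A, N):
--     # Phase 1: collect the peak indices once.
--     peaks = [i for i in range(1, N - 1) if A[i] > max(A[i - 1], A[i + 1])]
--     # Phase 2: prefix counts of peaks, via a merge pointer into `peaks`.
--     cum_ps = [0]
--     j = 0
--     for i in range(1, N - 1):
--         if j < len(peaks) and peaks[j] == i:
--             j += 1
--         cum_ps.append(j)
--     cum_ps.append(cum_ps[-1])
--     # Phase 3: the gap quantities, read off the peak list directly.
--     if peaks:
--         head_gap = peaks[0] + 1
--         max_gap = max((q - p for p, q in zip(peaks, peaks[1:])), default=0)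
--         cur_gap = (N - 2) - peaks[-1]
--     else:
--         head_gap = max_gap = cur_gap = 0
--     return cum_ps, max(head_gap, (max_gap + 2) // 2, cur_gap + 2)
-- ===== Notes on version B (the rewrite author's own statement) =====
-- stated objective: alternative
-- what changed: Replaces A's single stateful loop (running counters for peak count, head/max/current gap) with a three-phase decomposition: collect the peak-index list once, derive the prefix-count array with a merge pointer into that list, and read head/max/current gaps off the peak list in closed form.
import Mathlib
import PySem

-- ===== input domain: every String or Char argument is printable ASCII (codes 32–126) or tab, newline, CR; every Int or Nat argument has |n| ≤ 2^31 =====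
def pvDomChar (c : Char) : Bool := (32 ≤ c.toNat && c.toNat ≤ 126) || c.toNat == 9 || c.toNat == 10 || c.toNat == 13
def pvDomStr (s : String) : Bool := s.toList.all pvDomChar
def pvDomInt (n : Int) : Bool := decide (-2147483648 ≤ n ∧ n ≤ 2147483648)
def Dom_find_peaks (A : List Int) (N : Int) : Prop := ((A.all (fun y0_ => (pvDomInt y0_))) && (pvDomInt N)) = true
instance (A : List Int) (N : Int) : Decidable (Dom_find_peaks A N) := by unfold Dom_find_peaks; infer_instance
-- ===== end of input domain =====

-- B replaces A's single stateful loop by three phases (collect the peak list, derive prefix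
-- counts with a merge pointer, read the gaps off the peak list); alternative, not faster.

-- ===== PORT A =====
-- A-side helper: the body of A's for-loop (state: cum_p, cum_ps, max_gap, cur_gap, head_gap)
def pvStepA (A : List Int) (s : Int × List Int × Int × Int × Int) (i : Int) :
    Int × List Int × Int × Int × Int :=
  match s with
  | (cum_p, cum_ps, max_gap, cur_gap, head_gap) =>
    let cur_gap := if 0 < cum_p then cur_gap + 1 else cur_gap
    if PySem.List.pyGetD A i 0 > max (PySem.List.pyGetD A (i-1) 0) (PySem.List.pyGetD A (i+1) 0) then
      (cum_p + 1, cum_ps ++ [cum_p + 1], max cur_gap max_gap, 0,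
        if cum_p + 1 = 1 then i + 1 else head_gap)
    else
      (cum_p, cum_ps ++ [cum_p], max_gap, cur_gap, head_gap)

def find_peaks (A : List Int) (N : Int) : List Int × Int :=
  match (PySem.List.pyRange 1 (N-1) 1).foldl (pvStepA A) (0, [0], 0, 0, 0) with
  | (_, cum_ps, max_gap, cur_gap, head_gap) =>
    (cum_ps ++ [PySem.List.pyGetD cum_ps (-1) 0],
     max head_gap (max (PySem.Int.floordiv (max_gap + 2) 2) (cur_gap + 2)))

-- ===== PORT B =====
-- B-side helpers: the peak test, and the body of B's prefix-count loop (state: cum_ps, pointer j)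
def pvIsPeak (A : List Int) (i : Int) : Bool :=
  decide (PySem.List.pyGetD A i 0 > max (PySem.List.pyGetD A (i-1) 0) (PySem.List.pyGetD A (i+1) 0))

def pvStepB (peaks : List Int) (s : List Int × Nat) (i : Int) : List Int × Nat :=
  let j : Nat := match peaks[s.2]? with
           | some p => if p = i then s.2 + 1 else s.2
           | none => s.2
  (s.1 ++ [(j : Int)], j)

def find_peaks_alt (A : List Int) (N : Int) : List Int × Int :=
  let peaks := (PySem.List.pyRange 1 (N-1) 1).filter (pvIsPeak A)
  let cj := (PySem.List.pyRange 1 (N-1) 1).foldl (pvStepB peaks) ([0], 0)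
  let cum_ps := cj.1 ++ [PySem.List.pyGetD cj.1 (-1) 0]
  let g : Int × Int × Int :=
    if peaks ≠ [] then
      (PySem.List.pyGetD peaks 0 0 + 1,
       ((peaks.zip peaks.tail).map (fun pq => pq.2 - pq.1)).foldl max 0,
       (N - 2) - PySem.List.pyGetD peaks (-1) 0)
    else (0, 0, 0)
  (cum_ps, max g.1 (max (PySem.Int.floordiv (g.2.1 + 2) 2) (g.2.2 + 2)))

-- ===== PRECONDITION & SPEC =====
-- Pre_ excludes exactly the inputs where Python A raises IndexError (3 ≤ N but N > len(A)).
def Pre_find_peaks (A : List Int) (N : Int) : Prop := N ≤ 2 ∨ N ≤ (A.length : Int)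
instance (A : List Int) (N : Int) : Decidable (Pre_find_peaks A N) := by unfold Pre_find_peaks; infer_instance
def pvWitness_find_peaks : List Int × Int := ([1, 3, 2], 3)
def Spec_find_peaks (A : List Int) (N : Int) (out : List Int × Int) : Prop := out = find_peaks_alt A N
instance (A : List Int) (N : Int) (out : List Int × Int) : Decidable (Spec_find_peaks A N out) := by unfold Spec_find_peaks; infer_instance

-- ===== CLAIM (what is proved, stated in full; the proofs are below) =====
def Claim_equal_find_peaks : Prop := ∀ (A : List Int) (N : Int), Dom_find_peaks A N → Pre_find_peaks A N → Spec_find_peaks A N (find_peaks A N)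

-- ===== LEMMAS AND PROOFS =====

lemma pv_zip_tail_append (l : List Int) (x : Int) (h : l ≠ []) :
    (l ++ [x]).zip (l ++ [x]).tail = l.zip l.tail ++ [(l.getLast h, x)] := by
  induction l with
  | nil => simp at h
  | cons a t ih =>
    cases t with
    | nil => simp
    | cons b t' =>
      have := ih (by simp)
      simp only [List.cons_append, List.tail_cons, List.zip_cons_cons] at this ⊢
      rw [this]
      simp [List.getLast]

-- The loop invariant: after processing the range 1..k, A's fold state is determined by the
-- list of peaks found so far, and B's pointer equals the number of peaks found so far.
lemma pv_inv (A : List Int) (K : Nat) :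
    ∀ k : Nat, k ≤ K →
    ((PySem.List.pyRange 1 (1 + (k:Int)) 1).foldl (pvStepA A) (0, [0], 0, 0, 0) =
      ((((PySem.List.pyRange 1 (1 + (k:Int)) 1).filter (pvIsPeak A)).length : Int),
       ((PySem.List.pyRange 1 (1 + (k:Int)) 1).foldl
         (pvStepB ((PySem.List.pyRange 1 (1 + (K:Int)) 1).filter (pvIsPeak A))) ([0], 0)).1,
       ((((PySem.List.pyRange 1 (1 + (k:Int)) 1).filter (pvIsPeak A)).zip
           ((PySem.List.pyRange 1 (1 + (k:Int)) 1).filter (pvIsPeak A)).tail).map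
          (fun pq => pq.2 - pq.1)).foldl max 0,
       (match ((PySem.List.pyRange 1 (1 + (k:Int)) 1).filter (pvIsPeak A)).getLast? with
        | none => 0 | some q => (k:Int) - q),
       (match ((PySem.List.pyRange 1 (1 + (k:Int)) 1).filter (pvIsPeak A)).head? with
        | none => 0 | some p => p + 1))) ∧
    ((PySem.List.pyRange 1 (1 + (k:Int)) 1).foldl
      (pvStepB ((PySem.List.pyRange 1 (1 + (K:Int)) 1).filter (pvIsPeak A))) ([0], 0)).2 =
      ((PySem.List.pyRange 1 (1 + (k:Int)) 1).filter (pvIsPeak A)).length := by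
  intro k
  induction k with
  | zero =>
    intro _
    rw [PySem.List.pyRange_one_eq_nil (by norm_num)]
    simp
  | succ k ih =>
    intro hk1
    have hk : k ≤ K := Nat.le_of_succ_le hk1
    obtain ⟨ihA, ihB⟩ := ih hk
    have hrange : PySem.List.pyRange 1 (1 + ((k+1:Nat):Int)) 1
        = PySem.List.pyRange 1 (1 + (k:Int)) 1 ++ [1 + (k:Int)] := by
      have : (1 : Int) + ((k+1:Nat):Int) = (1 + (k:Int)) + 1 := by push_cast; ring
      rw [this, PySem.List.pyRange_one_succ_right (by omega)]
    have hsplit : PySem.List.pyRange 1 (1 + (K:Int)) 1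
        = PySem.List.pyRange 1 (1 + (k:Int)) 1 ++ PySem.List.pyRange (1 + (k:Int)) (1 + (K:Int)) 1 :=
      PySem.List.pyRange_one_append 1 (1+(k:Int)) (1+(K:Int)) (by omega) (by omega)
    set x : Int := 1 + (k:Int) with hx
    set P : List Int := (PySem.List.pyRange 1 x 1).filter (pvIsPeak A) with hP
    set Pf : List Int := (PySem.List.pyRange 1 (1 + (K:Int)) 1).filter (pvIsPeak A) with hPf
    clear_value x P Pf
    have hPfsplit : Pf = P ++ (PySem.List.pyRange x (1 + (K:Int)) 1).filter (pvIsPeak A) := by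
      rw [hPf, hsplit, List.filter_append, ← hP]
    have hxK : x < 1 + (K:Int) := by omega
    have hrest : PySem.List.pyRange x (1 + (K:Int)) 1
        = x :: PySem.List.pyRange (x+1) (1 + (K:Int)) 1 :=
      PySem.List.pyRange_one_cons hxK
    -- the pointer lookup at position P.length
    have hlookup : Pf[P.length]? = ((PySem.List.pyRange x (1 + (K:Int)) 1).filter (pvIsPeak A))[0]? := by
      rw [hPfsplit, List.getElem?_append_right (le_refl _)]
      simp
    by_cases hp : pvIsPeak A x = true
    · -- x is a peak
      have hcond : PySem.List.pyGetD A x 0 >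
          max (PySem.List.pyGetD A (x-1) 0) (PySem.List.pyGetD A (x+1) 0) := by
        have := hp
        unfold pvIsPeak at this
        exact of_decide_eq_true this
      have hget : Pf[P.length]? = some x := by
        rw [hlookup, hrest]
        simp [hp]
      have hP' : (PySem.List.pyRange 1 x 1 ++ [x]).filter (pvIsPeak A) = P ++ [x] := by
        rw [List.filter_append]
        simp [hp, hP]
      have hBstate : (PySem.List.pyRange 1 x 1).foldl (pvStepB Pf) ([0], 0)
          = (((PySem.List.pyRange 1 x 1).foldl (pvStepB Pf) ([0], 0)).1, P.length) := by
        rw [← ihB]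
      have hBstep : pvStepB Pf (((PySem.List.pyRange 1 x 1).foldl (pvStepB Pf) ([0], 0)).1, P.length) x
          = (((PySem.List.pyRange 1 x 1).foldl (pvStepB Pf) ([0], 0)).1 ++ [((P.length + 1 : Nat) : Int)],
             P.length + 1) := by
        simp [pvStepB, hget]
      have hc2 := max_lt_iff.mp hcond
      constructor
      · rw [hrange, List.foldl_append, List.foldl_append, ihA, hBstate, hP']
        rw [List.foldl_cons, List.foldl_nil, List.foldl_cons, List.foldl_nil, hBstep]
        by_cases hne : P = []
        · simp only [pvStepA, hne, List.length_nil, Nat.cast_zero, List.nil_append,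
            List.zip_nil_right, List.map_nil, List.foldl_nil, List.getLast?_nil, List.head?_nil,
            List.length_cons, List.tail_cons]
          rw [if_pos hcond]
          simp only [Prod.mk.injEq]
          norm_num
          rw [hx]
          ring
        · have hlast : P.getLast? = some (P.getLast hne) := List.getLast?_eq_some_getLast hne
          rw [pv_zip_tail_append P x hne]
          simp only [pvStepA, hlast, List.map_append, List.foldl_append]
          have hlp : 0 < P.length := List.length_pos_of_ne_nil hne
          have hlen : ¬ ((P.length : Int) + 1 = 1) := by omega
          have hpos : (0 : Int) < (P.length : Int) := by omega
          rw [if_pos hpos, if_pos hcond, if_neg hlen]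
          have hhead : (P ++ [x]).head? = P.head? := by
            rw [List.head?_append_of_ne_nil _ hne]
          have hlast' : (P ++ [x]).getLast? = some x := by simp
          rw [hhead, hlast']
          simp only [Prod.mk.injEq, List.map_cons, List.map_nil, List.foldl_cons, List.foldl_nil,
            List.length_append, List.length_cons, List.length_nil]
          have hx' : x = 1 + (k:Int) := hx
          refine ⟨by push_cast; ring, by push_cast; ring_nf, ?_, by rw [hx']; push_cast; ring, trivial⟩
          rw [max_comm]
          congr 1
          rw [hx']
          ring
      · rw [hrange, List.foldl_append, hBstate, List.foldl_cons, List.foldl_nil, hBstep, hP']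
        simp
    · -- x is not a peak
      have hcond : ¬ (PySem.List.pyGetD A x 0 >
          max (PySem.List.pyGetD A (x-1) 0) (PySem.List.pyGetD A (x+1) 0)) := by
        intro hc
        exact hp (decide_eq_true hc)
      have hP' : (PySem.List.pyRange 1 x 1 ++ [x]).filter (pvIsPeak A) = P := by
        rw [List.filter_append]
        simp [hp, hP]
      have hj : (match Pf[P.length]? with
          | some p => if p = x then P.length + 1 else P.length
          | none => P.length) = P.length := by
        cases h0 : Pf[P.length]? with
        | none => rfl
        | some p =>
          have hmem : p ∈ (PySem.List.pyRange x (1 + (K:Int)) 1).filter (pvIsPeak A) := by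
            rw [hlookup] at h0
            exact List.mem_of_getElem? h0
          have : p ∈ PySem.List.pyRange (x+1) (1 + (K:Int)) 1 := by
            rw [hrest] at hmem
            rcases List.mem_filter.mp hmem with ⟨hm, hpk⟩
            rcases List.mem_cons.mp hm with h | h
            · exact absurd (h ▸ hpk) (by simpa using hp)
            · exact h
          have hge : x + 1 ≤ p := (PySem.List.mem_pyRange_one.mp this).1
          simp only []
          rw [if_neg (by omega)]
      have hBstate : (PySem.List.pyRange 1 x 1).foldl (pvStepB Pf) ([0], 0)
          = (((PySem.List.pyRange 1 x 1).foldl (pvStepB Pf) ([0], 0)).1, P.length) := by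
        rw [← ihB]
      have hBstep : pvStepB Pf (((PySem.List.pyRange 1 x 1).foldl (pvStepB Pf) ([0], 0)).1, P.length) x
          = (((PySem.List.pyRange 1 x 1).foldl (pvStepB Pf) ([0], 0)).1 ++ [((P.length : Nat) : Int)],
             P.length) := by
        simp only [pvStepB]
        rw [hj]
      constructor
      · rw [hrange, List.foldl_append, List.foldl_append, ihA, hBstate, hP']
        rw [List.foldl_cons, List.foldl_nil, List.foldl_cons, List.foldl_nil, hBstep]
        by_cases hne : P = []
        · simp only [pvStepA, hne, List.length_nil, Nat.cast_zero, List.getLast?_nil,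
            List.head?_nil]
          rw [if_neg hcond]
          simp
        · have hlp : 0 < P.length := List.length_pos_of_ne_nil hne
          have hpos : (0 : Int) < (P.length : Int) := by omega
          have hlast : P.getLast? = some (P.getLast hne) := List.getLast?_eq_some_getLast hne
          simp only [pvStepA, hlast, if_neg hcond]
          rw [if_pos hpos]
          simp only [Prod.mk.injEq, true_and, and_true]
          push_cast
          ring
      · rw [hrange, List.foldl_append, hBstate, List.foldl_cons, List.foldl_nil, hBstep, hP']

-- ===== VERDICT (by name: the statement is the Claim_ definition above) =====
theorem find_peaks_spec : Claim_equal_find_peaks := by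
  unfold Claim_equal_find_peaks
  intro A N _ _
  unfold Spec_find_peaks
  by_cases hN : N ≤ 2
  · have hnil : PySem.List.pyRange 1 (N-1) 1 = [] := PySem.List.pyRange_one_eq_nil (by omega)
    unfold find_peaks find_peaks_alt
    rw [hnil]
    simp
  · set K : Nat := (N-2).toNat with hK
    have hNK : N - 1 = 1 + (K:Int) := by rw [hK]; omega
    have hN2 : N - 2 = (K:Int) := by rw [hK]; omega
    obtain ⟨hA, hB⟩ := pv_inv A K K le_rfl
    unfold find_peaks find_peaks_alt
    rw [hNK, hA]
    cases hPc : (PySem.List.pyRange 1 (1 + (K:Int)) 1).filter (pvIsPeak A) with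
    | nil =>
      simp
    | cons p l =>
      have hne : p :: l ≠ [] := by simp
      have hlast : PySem.List.pyGetD (p :: l) (-1) 0 = (p :: l).getLast hne :=
        PySem.List.pyGetD_neg_one (p :: l) 0 hne
      simp only [List.head?_cons, List.getLast?_eq_some_getLast hne,
        PySem.List.pyGetD_zero_cons, hlast, hN2]
      simp
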